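-- pv_equiv track=rewrite | github.com/rftim8/Rftim8Phoenix | CP/AdventOfCode/_21_KeypadConundrum.py | generate_sequences_from_letter_to_letter
-- ===== SOURCE A (Python) =====
-- def generate_sequences_from_letter_to_letter(key_pad, start, end):
--     to_check = [(start, "")]
--     while to_check:
--         current_position, path = to_check.pop()
--
--         target = key_pad[end]
--         if current_position == key_pad[end]:
--             yield path
--             continue
--
--         column_move = target[1] - current_position[1]
--         if column_move != 0:
--             new_point = current_position[0], current_position[1] + (
--                 column_move // abs(column_move)
--             )
--             if new_point in key_pad.values():
--                 if column_move > 0: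
--                     to_check.append((new_point, path + ">"))
--                 elif column_move < 0:
--                     to_check.append((new_point, path + "<"))
--
--         row_move = target[0] - current_position[0]
--         if row_move != 0:
--             new_point = (
--                 current_position[0] + (row_move // abs(row_move)),
--                 current_position[1],
--             )
--             if new_point in key_pad.values():
--                 if row_move > 0:
--                     to_check.append((new_point, path + "v"))
--                 elif row_move < 0:
--                     to_check.append((new_point, path + "^"))
-- ===== SOURCE B (Python) =====
-- def generate_sequences_from_letter_to_letter(key_pad, start, end):
--     target = key_pad[end]
--     values = set(key_pad.values())
--
--     def rec(pos, path):
--         if pos == target: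
--             yield path
--             return
--         row_move = target[0] - pos[0]
--         if row_move != 0:
--             np = (pos[0] + (1 if row_move > 0 else -1), pos[1])
--             if np in values:
--                 yield from rec(np, path + ("v" if row_move > 0 else "^"))
--         col_move = target[1] - pos[1]
--         if col_move != 0:
--             np = (pos[0], pos[1] + (1 if col_move > 0 else -1))
--             if np in values:
--                 yield from rec(np, path + (">" if col_move > 0 else "<"))
--
--     yield from rec(start, "")
-- ===== Notes on version B (the rewrite author's own statement) =====
-- stated objective: alternative
-- what changed: Replaces the explicit LIFO work-stack loop with a recursive generator over a single (pos,path) state, with the target looked up once and the dict values held in a set; recursing on the row branch first reproduces the stack's pop order exactly.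
import Mathlib
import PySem

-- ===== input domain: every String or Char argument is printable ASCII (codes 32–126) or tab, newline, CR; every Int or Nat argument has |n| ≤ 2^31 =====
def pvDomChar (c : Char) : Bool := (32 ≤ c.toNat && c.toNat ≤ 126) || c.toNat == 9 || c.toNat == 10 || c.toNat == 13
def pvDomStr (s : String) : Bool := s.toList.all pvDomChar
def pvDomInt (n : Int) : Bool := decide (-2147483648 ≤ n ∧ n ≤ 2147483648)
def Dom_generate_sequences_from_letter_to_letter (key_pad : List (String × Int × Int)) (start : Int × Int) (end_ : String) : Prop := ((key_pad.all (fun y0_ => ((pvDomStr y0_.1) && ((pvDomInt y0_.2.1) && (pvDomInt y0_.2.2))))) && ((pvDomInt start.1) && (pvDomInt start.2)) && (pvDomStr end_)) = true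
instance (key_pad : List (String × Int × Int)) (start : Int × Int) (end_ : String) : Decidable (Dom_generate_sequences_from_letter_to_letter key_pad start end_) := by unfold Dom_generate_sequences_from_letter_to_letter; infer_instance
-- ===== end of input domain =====

-- B replaces A's explicit LIFO work-stack loop by a recursive generator (row branch
-- first, matching the stack's pop order); equal yield order is proved. Both programs
-- raise KeyError when `end` is not a key of key_pad: those inputs are excluded by Pre_.
-- Both ports carry a Nat fuel as a pure totality guard (seeded above the proved step /
-- depth bound of the respective Python loop/recursion, so it is never exhausted).

-- ===== PORT A =====
-- grid distance to the target (used only to seed the totality fuel)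
def pvDist (target pos : Int × Int) : Nat := (target.1 - pos.1).natAbs + (target.2 - pos.2).natAbs

-- the (≤1-element) list A appends for the column move; `column_move // abs(column_move)` is PySem.Int.floordiv
def pvColPush (values : List (Int × Int)) (target pos : Int × Int) (path : String) : List ((Int × Int) × String) :=
  let column_move := target.2 - pos.2
  if column_move ≠ 0 then
    let new_point := (pos.1, pos.2 + PySem.Int.floordiv column_move ((column_move.natAbs : Int)))
    if values.contains new_point then
      if column_move > 0 then [(new_point, path ++ ">")]
      else if column_move < 0 then [(new_point, path ++ "<")]
      else []
    else []
  else []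

-- the (≤1-element) list A appends for the row move
def pvRowPush (values : List (Int × Int)) (target pos : Int × Int) (path : String) : List ((Int × Int) × String) :=
  let row_move := target.1 - pos.1
  if row_move ≠ 0 then
    let new_point := (pos.1 + PySem.Int.floordiv row_move ((row_move.natAbs : Int)), pos.2)
    if values.contains new_point then
      if row_move > 0 then [(new_point, path ++ "v")]
      else if row_move < 0 then [(new_point, path ++ "^")]
      else []
    else []
  else []

-- the while-loop of A; the stack is kept head-at-top (Python appends/pops at the end of
-- the list, so the row push — appended last — is popped first: it is consed outermost).
-- The fuel only guards totality (the loop's iteration count is bounded in the proofs below).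
def pvLoopA (values : List (Int × Int)) (target : Int × Int) :
    Nat → List ((Int × Int) × String) → List String
  | 0, _ => []
  | _ + 1, [] => []
  | fuel + 1, (current_position, path) :: rest =>
    if current_position = target then
      path :: pvLoopA values target fuel rest
    else
      pvLoopA values target fuel
        (pvRowPush values target current_position path ++
          (pvColPush values target current_position path ++ rest))

-- key_pad[end] raises KeyError when end is not a key (excluded by Pre_): modelled as none → []
def generate_sequences_from_letter_to_letter (key_pad : List (String × Int × Int)) (start : Int × Int) (end_ : String) : List String :=
  let d := PySem.Dict.ofList key_pad
  match PySem.Dict.get? d end_ with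
  | none => []
  | some target =>
    let values := PySem.Dict.values d
    pvLoopA values target (3 ^ (values.length + 1) * 3 ^ (pvDist target start + 1)) [(start, "")]

-- ===== PORT B =====
-- B's own distance helper (seeds its recursion-depth fuel; B shares no code with A)
def pvDistB (target pos : Int × Int) : Nat := (target.1 - pos.1).natAbs + (target.2 - pos.2).natAbs

-- the recursive generator rec(pos, path): row branch first, then column branch.
-- The fuel only guards totality (the recursion depth is bounded by the distance, proved below).
def pvRecB (values : PySem.Set (Int × Int)) (target : Int × Int) :
    Nat → (Int × Int) → String → List String
  | 0, _, _ => []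
  | fuel + 1, pos, path =>
    if pos = target then [path]
    else
      let row_move := target.1 - pos.1
      let rowPart :=
        if row_move ≠ 0 then
          let np := (pos.1 + (if row_move > 0 then (1 : Int) else -1), pos.2)
          if values.contains np then
            pvRecB values target fuel np (path ++ (if row_move > 0 then "v" else "^"))
          else []
        else []
      let column_move := target.2 - pos.2
      let colPart :=
        if column_move ≠ 0 then
          let np := (pos.1, pos.2 + (if column_move > 0 then (1 : Int) else -1))
          if values.contains np then
            pvRecB values target fuel np (path ++ (if column_move > 0 then ">" else "<"))
          else []
        else []
      rowPart ++ colPart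

def generate_sequences_from_letter_to_letter_alt (key_pad : List (String × Int × Int)) (start : Int × Int) (end_ : String) : List String :=
  let d := PySem.Dict.ofList key_pad
  match PySem.Dict.get? d end_ with
  | none => []
  | some target =>
    let values := PySem.Set.ofList (PySem.Dict.values d)
    pvRecB values target (pvDistB target start + 1) start ""

-- ===== PRECONDITION & SPEC =====
-- Pre_ excludes exactly the inputs on which both Pythons raise KeyError: end_ not a key of key_pad
def Pre_generate_sequences_from_letter_to_letter (key_pad : List (String × Int × Int)) (start : Int × Int) (end_ : String) : Prop :=
  (PySem.Dict.get? (PySem.Dict.ofList key_pad) end_).isSome = true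
instance (key_pad : List (String × Int × Int)) (start : Int × Int) (end_ : String) : Decidable (Pre_generate_sequences_from_letter_to_letter key_pad start end_) := by unfold Pre_generate_sequences_from_letter_to_letter; infer_instance

def pvWitness_generate_sequences_from_letter_to_letter : (List (String × Int × Int)) × (Int × Int) × String :=
  ([("a", 0, 0), ("b", 1, 2)], (0, 0), "b")

def Spec_generate_sequences_from_letter_to_letter (key_pad : List (String × Int × Int)) (start : Int × Int) (end_ : String) (out : List String) : Prop := out = generate_sequences_from_letter_to_letter_alt key_pad start end_
instance (key_pad : List (String × Int × Int)) (start : Int × Int) (end_ : String) (out : List String) : Decidable (Spec_generate_sequences_from_letter_to_letter key_pad start end_ out) := by unfold Spec_generate_sequences_from_letter_to_letter; infer_instance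

-- ===== CLAIM (what is proved, stated in full; the proofs are below) =====
def Claim_equal_generate_sequences_from_letter_to_letter : Prop := ∀ (key_pad : List (String × Int × Int)) (start : Int × Int) (end_ : String), Dom_generate_sequences_from_letter_to_letter key_pad start end_ → Pre_generate_sequences_from_letter_to_letter key_pad start end_ → Spec_generate_sequences_from_letter_to_letter key_pad start end_ (generate_sequences_from_letter_to_letter key_pad start end_)

-- ===== LEMMAS AND PROOFS =====

-- m // abs(m) (Python floor division) is the sign of m, for m ≠ 0
theorem pvSign (m : Int) (h : ¬ m = 0) :
    PySem.Int.floordiv m ((m.natAbs : Int)) = if m > 0 then 1 else -1 := by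
  have hpos : (0:Int) < (m.natAbs : Int) := by omega
  rw [PySem.Int.floordiv_eq_ediv_of_pos hpos]
  by_cases hm : m > 0
  · rw [if_pos hm]
    have he : (m.natAbs : Int) = m := by omega
    rw [he, Int.ediv_self (by omega)]
  · rw [if_neg hm]
    have he : (m.natAbs : Int) = -m := by omega
    rw [he]
    have h3 := Int.neg_ediv_of_dvd (dvd_refl (-m))
    rw [Int.ediv_self (show (-m) ≠ 0 by omega)] at h3
    simpa using h3

theorem setContains (l : List (Int × Int)) (x : Int × Int) :
    (PySem.Set.ofList l).contains x = l.contains x := by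
  simp [PySem.Set.contains, ← PySem.List.dedup_eq_ofList, PySem.List.mem_dedup]

theorem pvDistB_eq (target pos : Int × Int) : pvDistB target pos = pvDist target pos := rfl

theorem pvDist_dec_row (target pos : Int × Int) (h : target.1 - pos.1 ≠ 0) :
    pvDist target (pos.1 + (if target.1 - pos.1 > 0 then (1 : Int) else -1), pos.2) < pvDist target pos := by
  simp only [pvDist]
  split_ifs <;> omega

theorem pvDist_dec_col (target pos : Int × Int) (h : target.2 - pos.2 ≠ 0) :
    pvDist target (pos.1, pos.2 + (if target.2 - pos.2 > 0 then (1 : Int) else -1)) < pvDist target pos := by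
  simp only [pvDist]
  split_ifs <;> omega

-- proof-side reference: the unbounded recursive generator (well-founded on the distance)
def gRec (values : List (Int × Int)) (target pos : Int × Int) (path : String) : List String :=
  if pos = target then [path]
  else
    let row_move := target.1 - pos.1
    let rowPart :=
      if row_move ≠ 0 then
        let np := (pos.1 + (if row_move > 0 then (1 : Int) else -1), pos.2)
        if values.contains np then
          gRec values target np (path ++ (if row_move > 0 then "v" else "^"))
        else []
      else []
    let column_move := target.2 - pos.2
    let colPart :=
      if column_move ≠ 0 then
        let np := (pos.1, pos.2 + (if column_move > 0 then (1 : Int) else -1))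
        if values.contains np then
          gRec values target np (path ++ (if column_move > 0 then ">" else "<"))
        else []
      else []
    rowPart ++ colPart
termination_by pvDist target pos
decreasing_by
  · exact pvDist_dec_row target pos (by assumption)
  · exact pvDist_dec_col target pos (by assumption)

-- B's fuel is sufficient: above the remaining distance the fuel never runs out
theorem pvRecB_eq_gRec (values : List (Int × Int)) (target : Int × Int) :
    ∀ (fuel : Nat) (pos : Int × Int) (path : String), pvDist target pos < fuel →
      pvRecB (PySem.Set.ofList values) target fuel pos path = gRec values target pos path := by
  intro fuel
  induction fuel with
  | zero => intro pos path h; omega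
  | succ fuel ih =>
    intro pos path h
    rw [pvRecB, gRec.eq_def]
    by_cases ht : pos = target
    · rw [if_pos ht, if_pos ht]
    · rw [if_neg ht, if_neg ht]
      dsimp only
      rw [setContains, setContains]
      congr 1
      · by_cases h1 : target.1 - pos.1 = 0
        · simp [h1]
        · rw [if_pos h1, if_pos h1]
          split_ifs
          all_goals try rfl
          all_goals apply ih
          all_goals simp only [pvDist] at h ⊢
          all_goals omega
      · by_cases h1 : target.2 - pos.2 = 0
        · simp [h1]
        · rw [if_pos h1, if_pos h1]
          split_ifs
          all_goals try rfl
          all_goals apply ih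
          all_goals simp only [pvDist] at h ⊢
          all_goals omega

-- rank of a point: how many values entries are strictly closer to the target.
-- Every point A ever pushes is a values entry strictly closer than its parent, so the
-- rank drops along every branch; Σ 3^rank over the stack bounds the remaining work.
def pvRank (values : List (Int × Int)) (target pos : Int × Int) : Nat :=
  values.countP (fun v => pvDist target v < pvDist target pos)

def pvM (values : List (Int × Int)) (target : Int × Int) (st : List ((Int × Int) × String)) : Nat :=
  (st.map (fun it => 3 ^ pvRank values target it.1)).sum

theorem pvRank_lt (values : List (Int × Int)) (target p q : Int × Int) (hq : q ∈ values)
    (hd : pvDist target q < pvDist target p) :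
    pvRank values target q < pvRank values target p := by
  induction values with
  | nil => cases hq
  | cons a l ih =>
    simp only [pvRank, List.countP_cons, decide_eq_true_eq] at *
    rcases List.mem_cons.mp hq with rfl | ha
    · have h1 : l.countP (fun v => decide (pvDist target v < pvDist target q))
          ≤ l.countP (fun v => decide (pvDist target v < pvDist target p)) := by
        apply List.countP_mono_left
        intro v _ hv
        simp only [decide_eq_true_eq] at hv ⊢
        omega
      rw [if_neg (by omega), if_pos (by omega)]
      omega
    · have h2 := ih ha
      split_ifs <;> omega

-- each push is [] or a single item: a values entry strictly closer to the target
theorem pvRowPush_cases (values : List (Int × Int)) (target pos : Int × Int) (path : String) :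
    pvRowPush values target pos path = [] ∨
      ∃ q s, pvRowPush values target pos path = [(q, s)] ∧ q ∈ values ∧
        pvDist target q < pvDist target pos := by
  unfold pvRowPush
  dsimp only
  rcases eq_or_ne (target.1 - pos.1) 0 with h1 | h1
  · simp [h1]
  · rw [if_pos h1, pvSign _ h1]
    by_cases h3 : target.1 - pos.1 > 0
    · simp only [if_pos h3]
      by_cases h2 : values.contains (pos.1 + 1, pos.2)
      · rw [if_pos h2]
        exact Or.inr ⟨_, _, rfl, by simpa using h2, by simp only [pvDist]; omega⟩
      · rw [if_neg h2]; exact Or.inl rfl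
    · have h4 : target.1 - pos.1 < 0 := by omega
      simp only [if_neg h3, if_pos h4]
      by_cases h2 : values.contains (pos.1 + -1, pos.2)
      · rw [if_pos h2]
        exact Or.inr ⟨_, _, rfl, by simpa using h2, by simp only [pvDist]; omega⟩
      · rw [if_neg h2]; exact Or.inl rfl

theorem pvColPush_cases (values : List (Int × Int)) (target pos : Int × Int) (path : String) :
    pvColPush values target pos path = [] ∨
      ∃ q s, pvColPush values target pos path = [(q, s)] ∧ q ∈ values ∧
        pvDist target q < pvDist target pos := by
  unfold pvColPush
  dsimp only
  rcases eq_or_ne (target.2 - pos.2) 0 with h1 | h1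
  · simp [h1]
  · rw [if_pos h1, pvSign _ h1]
    by_cases h3 : target.2 - pos.2 > 0
    · simp only [if_pos h3]
      by_cases h2 : values.contains (pos.1, pos.2 + 1)
      · rw [if_pos h2]
        exact Or.inr ⟨_, _, rfl, by simpa using h2, by simp only [pvDist]; omega⟩
      · rw [if_neg h2]; exact Or.inl rfl
    · have h4 : target.2 - pos.2 < 0 := by omega
      simp only [if_neg h3, if_pos h4]
      by_cases h2 : values.contains (pos.1, pos.2 + -1)
      · rw [if_pos h2]
        exact Or.inr ⟨_, _, rfl, by simpa using h2, by simp only [pvDist]; omega⟩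
      · rw [if_neg h2]; exact Or.inl rfl

theorem pvM_push_lt (values : List (Int × Int)) (target pos : Int × Int) (path : String) :
    pvM values target (pvRowPush values target pos path) +
      pvM values target (pvColPush values target pos path) < 3 ^ pvRank values target pos := by
  have hbound : ∀ (l : List ((Int × Int) × String)),
      (l = [] ∨ ∃ q s, l = [(q, s)] ∧ q ∈ values ∧ pvDist target q < pvDist target pos) →
      (pvM values target l = 0 ∨
        (1 ≤ pvRank values target pos ∧ pvM values target l ≤ 3 ^ (pvRank values target pos - 1))) := by
    rintro l (rfl | ⟨q, s, rfl, hq, hd⟩)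
    · exact Or.inl rfl
    · right
      have hr := pvRank_lt values target pos q hq hd
      constructor
      · omega
      · simp only [pvM, List.map_cons, List.map_nil, List.sum_cons, List.sum_nil]
        have : 3 ^ pvRank values target q ≤ 3 ^ (pvRank values target pos - 1) :=
          Nat.pow_le_pow_right (by norm_num) (by omega)
        omega
  have h1 := hbound _ (pvRowPush_cases values target pos path)
  have h2 := hbound _ (pvColPush_cases values target pos path)
  have hp : 1 ≤ 3 ^ pvRank values target pos := Nat.one_le_pow _ _ (by norm_num)
  have hs : 3 ^ (pvRank values target pos - 1) * 3 = 3 ^ (pvRank values target pos - 1 + 1) :=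
    (pow_succ 3 _).symm
  rcases h1 with h1 | ⟨hr1, h1⟩ <;> rcases h2 with h2 | ⟨hr2, h2⟩
  · omega
  · have : 3 ^ (pvRank values target pos - 1 + 1) = 3 ^ pvRank values target pos := by
      congr 1; omega
    omega
  · have : 3 ^ (pvRank values target pos - 1 + 1) = 3 ^ pvRank values target pos := by
      congr 1; omega
    omega
  · have : 3 ^ (pvRank values target pos - 1 + 1) = 3 ^ pvRank values target pos := by
      congr 1; omega
    omega

theorem pvM_append (values : List (Int × Int)) (target : Int × Int)
    (a b : List ((Int × Int) × String)) :
    pvM values target (a ++ b) = pvM values target a + pvM values target b := by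
  simp [pvM]

-- B's row branch is exactly A's row push, flattened through the recursion
theorem flat_rowPush (values : List (Int × Int)) (target pos : Int × Int) (path : String) :
    ((pvRowPush values target pos path).map
        (fun it => gRec values target it.1 it.2)).flatten
      = (if (target.1 - pos.1) ≠ 0 then
           let np := (pos.1 + (if target.1 - pos.1 > 0 then (1 : Int) else -1), pos.2)
           if values.contains np then
             gRec values target np (path ++ (if target.1 - pos.1 > 0 then "v" else "^"))
           else []
         else []) := by
  unfold pvRowPush
  dsimp only
  rcases eq_or_ne (target.1 - pos.1) 0 with h1 | h1
  · simp [h1]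
  · rw [if_pos h1, if_pos h1, pvSign _ h1]
    split_ifs
    all_goals try (exfalso; omega)
    all_goals simp

theorem flat_colPush (values : List (Int × Int)) (target pos : Int × Int) (path : String) :
    ((pvColPush values target pos path).map
        (fun it => gRec values target it.1 it.2)).flatten
      = (if (target.2 - pos.2) ≠ 0 then
           let np := (pos.1, pos.2 + (if target.2 - pos.2 > 0 then (1 : Int) else -1))
           if values.contains np then
             gRec values target np (path ++ (if target.2 - pos.2 > 0 then ">" else "<"))
           else []
         else []) := by
  unfold pvColPush
  dsimp only
  rcases eq_or_ne (target.2 - pos.2) 0 with h1 | h1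
  · simp [h1]
  · rw [if_pos h1, if_pos h1, pvSign _ h1]
    split_ifs
    all_goals try (exfalso; omega)
    all_goals simp

-- A's DFS over the stack yields, in order, the reference recursion applied to each item;
-- the fuel never runs out while it exceeds Σ 3^rank over the stack
theorem pvLoopA_flat (values : List (Int × Int)) (target : Int × Int) :
    ∀ (fuel : Nat) (st : List ((Int × Int) × String)), pvM values target st < fuel →
      pvLoopA values target fuel st
        = (st.map (fun it => gRec values target it.1 it.2)).flatten := by
  intro fuel
  induction fuel with
  | zero => intro st h; omega
  | succ fuel ih =>
    intro st h
    match st with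
    | [] => simp [pvLoopA]
    | (pos, path) :: rest =>
      have hcons : pvM values target ((pos, path) :: rest)
          = 3 ^ pvRank values target pos + pvM values target rest := by
        simp [pvM]
      by_cases ht : pos = target
      · rw [pvLoopA, if_pos ht]
        have hp : 1 ≤ 3 ^ pvRank values target pos := Nat.one_le_pow _ _ (by norm_num)
        rw [ih rest (by omega)]
        simp only [List.map_cons, List.flatten_cons]
        rw [gRec.eq_def, if_pos ht]
        simp
      · rw [pvLoopA, if_neg ht]
        have hstep := pvM_push_lt values target pos path
        have hnew : pvM values target
            (pvRowPush values target pos path ++ (pvColPush values target pos path ++ rest)) < fuel := by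
          rw [pvM_append, pvM_append]
          omega
        rw [ih _ hnew]
        simp only [List.map_append, List.flatten_append, List.map_cons, List.flatten_cons]
        rw [gRec.eq_def, if_neg ht]
        dsimp only
        rw [flat_rowPush, flat_colPush]
        simp [List.append_assoc]

-- ===== VERDICT (by name: the statement is the Claim_ definition above) =====
theorem generate_sequences_from_letter_to_letter_spec : Claim_equal_generate_sequences_from_letter_to_letter := by
  intro key_pad start end_ _ _
  unfold Spec_generate_sequences_from_letter_to_letter
  unfold generate_sequences_from_letter_to_letter generate_sequences_from_letter_to_letter_alt
  cases hget : PySem.Dict.get? (PySem.Dict.ofList key_pad) end_ with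
  | none => simp only [hget]
  | some target =>
    simp only [hget]
    set values := PySem.Dict.values (PySem.Dict.ofList key_pad) with hv
    have hrank : pvRank values target start ≤ values.length := by
      simpa [pvRank] using List.countP_le_length (l := values)
    have hfuel : pvM values target [(start, "")]
        < 3 ^ (values.length + 1) * 3 ^ (pvDist target start + 1) := by
      have h1 : pvM values target [(start, "")] = 3 ^ pvRank values target start := by
        simp [pvM]
      have h2 : 3 ^ pvRank values target start < 3 ^ (values.length + 1) :=
        Nat.pow_lt_pow_right (by norm_num) (by omega)
      have h3 : 1 ≤ 3 ^ (pvDist target start + 1) := Nat.one_le_pow _ _ (by norm_num)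
      calc pvM values target [(start, "")] < 3 ^ (values.length + 1) := by omega
        _ ≤ 3 ^ (values.length + 1) * 3 ^ (pvDist target start + 1) :=
          Nat.le_mul_of_pos_right _ (by omega)
    rw [pvLoopA_flat values target _ _ hfuel]
    rw [pvRecB_eq_gRec values target _ _ _ (by have := pvDistB_eq target start; omega)]
    simp
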